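-- pv_equiv track=rewrite | github.com/marciolemosti/proj_bi_2025 | streamlit_app.py | get_period_groups
-- ===== SOURCE A (Python) =====
-- def get_period_groups(years, group_size):
--     if not years or group_size < 1:
--         return []
--     min_year = min(years)
--     max_year = max(years)
--     groups = []
--     current_year = max_year
--     while current_year >= min_year:
--         start_year = max(min_year, current_year - (group_size - 1))
--         group_label = f"{start_year}-{current_year}"
--         groups.append((group_label, list(range(start_year, current_year + 1))))
--         current_year -= group_size
--     return groups
-- ===== SOURCE B (Python) =====
-- def get_period_groups(years, group_size):
--     if not years or group_size < 1:
--         return []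
--     lo, hi = min(years), max(years)
--     ys = list(range(hi, lo - 1, -1))
--     groups = []
--     i = 0
--     while i < len(ys):
--         chunk = ys[i:i + group_size]
--         groups.append((f"{chunk[-1]}-{chunk[0]}", chunk[::-1]))
--         i += group_size
--     return groups
-- ===== Notes on version B (the rewrite author's own statement) =====
-- stated objective: alternative
-- what changed: B builds the full descending year range once and chunks it into group_size slices (label from chunk ends, reversed chunk as the group), instead of A's descending cursor loop that recomputes each group boundary and range.
import Mathlib
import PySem

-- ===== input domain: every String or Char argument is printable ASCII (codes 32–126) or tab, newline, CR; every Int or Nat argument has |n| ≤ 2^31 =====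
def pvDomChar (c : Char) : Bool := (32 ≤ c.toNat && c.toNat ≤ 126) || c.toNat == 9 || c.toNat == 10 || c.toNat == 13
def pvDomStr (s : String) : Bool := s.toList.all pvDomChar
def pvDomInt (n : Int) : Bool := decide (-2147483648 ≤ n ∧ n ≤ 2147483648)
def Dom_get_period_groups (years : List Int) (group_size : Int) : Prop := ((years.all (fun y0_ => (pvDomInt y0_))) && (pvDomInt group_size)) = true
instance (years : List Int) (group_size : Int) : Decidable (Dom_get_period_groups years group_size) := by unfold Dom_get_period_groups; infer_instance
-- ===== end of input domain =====

-- B chunks a prebuilt descending enumeration of the years into slices instead of stepping a cursor with boundary arithmetic (objective: alternative decomposition, same cost).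

-- ===== PORT A =====
-- A's while loop over the descending cursor; the hypothesis 1 ≤ gs comes from A's guard and is only used for termination.
def pvALoop (minY gs : Int) (h : 1 ≤ gs) (cur : Int) : List (String × List Int) :=
  if cur ≥ minY then
    (String.ofList (PySem.Int.toChars (max minY (cur - (gs - 1))) ++ '-' :: PySem.Int.toChars cur),
      PySem.List.pyRange (max minY (cur - (gs - 1))) (cur + 1) 1) :: pvALoop minY gs h (cur - gs)
  else []
termination_by (cur + 1 - minY).toNat
decreasing_by omega

def get_period_groups (years : List Int) (group_size : Int) : List (String × List Int) :=
  if h : years = [] ∨ group_size < 1 then []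
  else
    -- min(years)/max(years); the list is nonempty here, so getD 0 is never taken
    let minY := (PySem.List.min? years (fun y => y)).getD 0
    let maxY := (PySem.List.max? years (fun y => y)).getD 0
    pvALoop minY group_size (by omega) maxY

-- ===== PORT B =====
-- B's index loop 'while i < len(ys): chunk = ys[i:i+gs]; …; i += gs' transcribed as recursion on the
-- remaining suffix (ys[i:i+gs] = (ys.drop i).take gs); chunk[0]/chunk[-1] on the nonempty chunk are headI/getLastI.
def pvBLoop (gs : Nat) (h : 0 < gs) (ys : List Int) : List (String × List Int) :=
  if ys = [] then []
  else
    (String.ofList (PySem.Int.toChars (ys.take gs).getLastI ++ '-' :: PySem.Int.toChars (ys.take gs).headI),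
      (ys.take gs).reverse) :: pvBLoop gs h (ys.drop gs)
termination_by ys.length
decreasing_by cases ys with
  | nil => simp_all
  | cons a t => simp; omega

def get_period_groups_alt (years : List Int) (group_size : Int) : List (String × List Int) :=
  if h : years = [] ∨ group_size < 1 then []
  else
    let lo := (PySem.List.min? years (fun y => y)).getD 0
    let hi := (PySem.List.max? years (fun y => y)).getD 0
    pvBLoop group_size.toNat (by omega) (PySem.List.pyRange hi (lo - 1) (-1))

-- ===== PRECONDITION & SPEC =====
def Spec_get_period_groups (years : List Int) (group_size : Int) (out : List (String × List Int)) : Prop := out = get_period_groups_alt years group_size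
instance (years : List Int) (group_size : Int) (out : List (String × List Int)) : Decidable (Spec_get_period_groups years group_size out) := by unfold Spec_get_period_groups; infer_instance

-- ===== CLAIM (what is proved, stated in full; the proofs are below) =====
def Claim_equal_get_period_groups : Prop := ∀ (years : List Int) (group_size : Int), Dom_get_period_groups years group_size → Spec_get_period_groups years group_size (get_period_groups years group_size)

-- ===== LEMMAS AND PROOFS =====

lemma drop_pyRange_neg_one (k : Nat) (a b : Int) :
    (PySem.List.pyRange a b (-1)).drop k = PySem.List.pyRange (a - k) b (-1) := by
  induction k generalizing a with
  | zero => simp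
  | succ n ih =>
    by_cases hab : a ≤ b
    · rw [PySem.List.pyRange_neg_one_eq_nil hab, PySem.List.pyRange_neg_one_eq_nil (by push_cast; omega)]
      simp
    · rw [PySem.List.pyRange_neg_one_cons (by omega)]
      simp only [List.drop_succ_cons, ih]
      congr 1; push_cast; ring

lemma take_pyRange_neg_one (k : Nat) (a b : Int) :
    (PySem.List.pyRange a b (-1)).take k = PySem.List.pyRange a (max b (a - k)) (-1) := by
  induction k generalizing a with
  | zero => rw [List.take_zero, PySem.List.pyRange_neg_one_eq_nil (by omega)]
  | succ n ih =>
    by_cases hab : a ≤ b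
    · rw [PySem.List.pyRange_neg_one_eq_nil hab, PySem.List.pyRange_neg_one_eq_nil (by omega)]
      simp
    · rw [PySem.List.pyRange_neg_one_cons (by omega), List.take_succ_cons, ih,
        PySem.List.pyRange_neg_one_cons (a := a) (by push_cast; omega)]
      congr 2; push_cast; omega

lemma headI_pyRange_neg_one (a b : Int) (h : b < a) :
    (PySem.List.pyRange a b (-1)).headI = a := by
  rw [PySem.List.pyRange_neg_one_cons h]; rfl

lemma getLastI_pyRange_neg_one (a b : Int) (h : b < a) :
    (PySem.List.pyRange a b (-1)).getLastI = b + 1 := by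
  rw [PySem.List.pyRange_neg_one_eq_reverse]
  rw [PySem.List.pyRange_one_cons (by omega)]
  simp [List.getLastI_eq_getLast?_getD, List.getLast?_reverse]

-- main correspondence: A's cursor loop equals B's chunking of the descending range
lemma loop_eq (minY gs : Int) (h : 1 ≤ gs) (cur : Int) :
    pvALoop minY gs h cur = pvBLoop gs.toNat (by omega) (PySem.List.pyRange cur (minY - 1) (-1)) := by
  by_cases hc : cur ≥ minY
  · rw [pvALoop, pvBLoop]
    have hne : PySem.List.pyRange cur (minY - 1) (-1) ≠ [] := by
      rw [PySem.List.pyRange_neg_one_cons (by omega)]; simp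
    rw [if_pos hc, if_neg hne]
    have hk : ((gs.toNat : Int)) = gs := by omega
    have htake : (PySem.List.pyRange cur (minY - 1) (-1)).take gs.toNat
        = PySem.List.pyRange cur (max (minY - 1) (cur - gs)) (-1) := by
      rw [take_pyRange_neg_one]; congr 2; omega
    have hmax : max (minY - 1) (cur - gs) < cur := by omega
    have hdrop : (PySem.List.pyRange cur (minY - 1) (-1)).drop gs.toNat
        = PySem.List.pyRange (cur - gs) (minY - 1) (-1) := by
      rw [drop_pyRange_neg_one]; congr 1; omega
    rw [htake, hdrop, loop_eq minY gs h (cur - gs),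
      getLastI_pyRange_neg_one _ _ hmax, headI_pyRange_neg_one _ _ hmax,
      show (PySem.List.pyRange cur (max (minY - 1) (cur - gs)) (-1)).reverse
          = PySem.List.pyRange (max (minY - 1) (cur - gs) + 1) (cur + 1) 1 from by
        rw [PySem.List.pyRange_neg_one_eq_reverse, List.reverse_reverse],
      show max (minY - 1) (cur - gs) + 1 = max minY (cur - (gs - 1)) from by omega]
  · rw [pvALoop, pvBLoop]
    rw [if_neg hc, if_pos (by rw [PySem.List.pyRange_neg_one_eq_nil (by omega)])]
termination_by (cur + 1 - minY).toNat
decreasing_by omega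

-- ===== VERDICT (by name: the statement is the Claim_ definition above) =====
theorem get_period_groups_spec : Claim_equal_get_period_groups := by
  intro years gs _
  unfold Spec_get_period_groups get_period_groups get_period_groups_alt
  by_cases h : years = [] ∨ gs < 1
  · rw [dif_pos h, dif_pos h]
  · rw [dif_neg h, dif_neg h]
    exact loop_eq _ gs (by omega) _
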